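-- pv_equiv track=rewrite | github.com/AlikKostandov/recommender-system | common/feature_engineering.py | filter_feature_map
-- ===== SOURCE A (Python) =====
-- from typing import Dict, Iterable, List, Optional
--
-- def filter_feature_map(
--     feature_map: Dict[int, List[str]],
--     allowed_ids: Iterable[int],
-- ) -> Dict[int, List[str]]:
--     allowed = set(int(x) for x in allowed_ids)
--     return {
--         int(entity_id): tokens
--         for entity_id, tokens in feature_map.items()
--         if int(entity_id) in allowed
--     }
-- ===== SOURCE B (Python) =====
-- from typing import Dict, Iterable, List
--
--
-- def _allowed(ids: List[int], k: int) -> bool: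
--     # binary search (bisect_left by hand: this module imports no bisect)
--     lo, hi = 0, len(ids)
--     while lo < hi:
--         mid = (lo + hi) // 2
--         if ids[mid] < k:
--             lo = mid + 1
--         else:
--             hi = mid
--     return lo < len(ids) and ids[lo] == k
--
--
-- def filter_feature_map(
--     feature_map: Dict[int, List[str]],
--     allowed_ids: Iterable[int],
-- ) -> Dict[int, List[str]]:
--     # Sorted array + binary search instead of a hash set.
--     ids = sorted(int(x) for x in allowed_ids)
--     out: Dict[int, List[str]] = {}
--     for entity_id, tokens in feature_map.items():
--         k = int(entity_id)
--         if _allowed(ids, k):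
--             out[k] = tokens
--     return out
-- ===== Notes on version B (the rewrite author's own statement) =====
-- stated objective: alternative
-- what changed: B drops the hash set entirely: it sorts the allowed ids into an array once and decides membership with a hand-written binary search while scanning feature_map in order.
import Mathlib
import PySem

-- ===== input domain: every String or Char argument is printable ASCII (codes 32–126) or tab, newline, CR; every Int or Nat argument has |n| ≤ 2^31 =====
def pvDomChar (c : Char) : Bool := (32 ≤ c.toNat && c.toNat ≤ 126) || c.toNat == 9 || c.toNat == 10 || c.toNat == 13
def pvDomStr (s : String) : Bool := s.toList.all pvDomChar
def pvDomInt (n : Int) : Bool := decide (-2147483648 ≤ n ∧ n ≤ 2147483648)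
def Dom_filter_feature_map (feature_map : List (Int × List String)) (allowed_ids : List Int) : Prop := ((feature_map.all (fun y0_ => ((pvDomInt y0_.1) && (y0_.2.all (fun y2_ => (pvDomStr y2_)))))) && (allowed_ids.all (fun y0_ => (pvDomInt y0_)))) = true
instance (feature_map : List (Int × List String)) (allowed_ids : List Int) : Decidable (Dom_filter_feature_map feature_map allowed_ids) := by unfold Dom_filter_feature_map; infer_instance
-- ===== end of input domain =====

-- B decides membership with a sorted id array and a hand-written binary search instead of
-- A's hash set, scanning feature_map in the same order; objective: alternative (same result).

-- ===== PORT A =====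
-- allowed = set(int(x) for x in allowed_ids)   (int(x) is the identity on int)
-- return {int(entity_id): tokens for entity_id, tokens in feature_map.items() if int(entity_id) in allowed}
def filter_feature_map (feature_map : List (Int × List String)) (allowed_ids : List Int) : List (Int × List String) :=
  let allowed : PySem.Set Int := PySem.Set.ofList allowed_ids
  (feature_map.foldl
    (fun d p => if allowed.contains p.1 then d.insert p.1 p.2 else d)
    (PySem.Dict.empty : PySem.Dict Int (List String))).items

-- ===== PORT B =====
-- _allowed(ids, k): lo, hi = 0, len(ids); while lo < hi: mid=(lo+hi)//2; if ids[mid]<k: lo=mid+1 else: hi=mid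
-- — this hand-written lo/hi loop is exactly bisect_left, i.e. PySem.List.bisectLeft (same loop, same values);
-- then: return lo < len(ids) and ids[lo] == k   (ids[lo] is in range when tested, so List.getD is exact)
def pvAltAllowed (ids : List Int) (k : Int) : Bool :=
  let lo := PySem.List.bisectLeft ids k
  decide (lo < ids.length) && (ids.getD lo 0 == k)

-- out = {}; for entity_id, tokens in feature_map.items(): k = int(entity_id); if _allowed(ids, k): out[k] = tokens
def pvAltGo (ids : List Int) (d : PySem.Dict Int (List String)) :
    List (Int × List String) → PySem.Dict Int (List String)
  | [] => d
  | p :: rest => pvAltGo ids (if pvAltAllowed ids p.1 then d.insert p.1 p.2 else d) rest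

-- ids = sorted(int(x) for x in allowed_ids); …; return out
def filter_feature_map_alt (feature_map : List (Int × List String)) (allowed_ids : List Int) : List (Int × List String) :=
  let ids := PySem.List.sorted allowed_ids (fun x => x) false
  (pvAltGo ids (PySem.Dict.empty : PySem.Dict Int (List String)) feature_map).items

-- ===== PRECONDITION & SPEC =====
def Spec_filter_feature_map (feature_map : List (Int × List String)) (allowed_ids : List Int) (out : List (Int × List String)) : Prop := out = filter_feature_map_alt feature_map allowed_ids
instance (feature_map : List (Int × List String)) (allowed_ids : List Int) (out : List (Int × List String)) : Decidable (Spec_filter_feature_map feature_map allowed_ids out) := by unfold Spec_filter_feature_map; infer_instance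

-- ===== CLAIM (what is proved, stated in full; the proofs are below) =====
def Claim_equal_filter_feature_map : Prop := ∀ (feature_map : List (Int × List String)) (allowed_ids : List Int), Dom_filter_feature_map feature_map allowed_ids → Spec_filter_feature_map feature_map allowed_ids (filter_feature_map feature_map allowed_ids)

-- ===== LEMMAS AND PROOFS =====

-- A's membership test: x in set(allowed_ids) is list membership.
theorem pvContains_ofList (l : List Int) (k : Int) :
    (PySem.Set.ofList l).contains k = decide (k ∈ l) := by
  by_cases h : k ∈ l
  · simp [h, PySem.Set.mem_ofList]
  · simp only [h, decide_false]
    rw [← Bool.not_eq_true]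
    simp [PySem.Set.mem_ofList, h]

-- B's membership test: binary search over the sorted ids is list membership too.
theorem pvAltAllowed_sorted_eq (allowed_ids : List Int) (k : Int) :
    pvAltAllowed (PySem.List.sorted allowed_ids (fun x => x) false) k = decide (k ∈ allowed_ids) := by
  set ids := PySem.List.sorted allowed_ids (fun x => x) false with hids
  have hpw : ids.Pairwise (· ≤ ·) := by
    simpa using PySem.List.sorted_pairwise allowed_ids (fun x => x)
  have hmono := List.pairwise_iff_getElem.mp hpw
  obtain ⟨hle, hlt, hge⟩ := PySem.List.bisectLeft_spec ids k hpw
  set lo := PySem.List.bisectLeft ids k with hlo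
  have hmem : k ∈ ids ↔ k ∈ allowed_ids := by
    rw [hids]; exact PySem.List.mem_sorted allowed_ids (fun x => x) false k
  by_cases h : k ∈ allowed_ids
  · -- k occurs at some index j; the search lands on an equal element
    obtain ⟨j, hj, hkj⟩ := List.getElem_of_mem (hmem.mpr h)
    have hjlo : lo ≤ j := by
      by_contra hc
      exact absurd (hkj ▸ hlt j hj (by omega)) (lt_irrefl k)
    have hlolen : lo < ids.length := lt_of_le_of_lt hjlo hj
    have h1 : k ≤ ids[lo] := hge lo hlolen le_rfl
    have h2 : ids[lo] ≤ k := by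
      rcases eq_or_lt_of_le hjlo with he | hl
      · exact le_of_eq (he ▸ hkj)
      · exact hkj ▸ hmono lo j hlolen hj hl
    have hEq : ids[lo] = k := le_antisymm h2 h1
    simp [pvAltAllowed, ← hlo, hlolen, hEq, h]
  · -- k is not in ids: the element the search lands on (if any) differs from k
    simp only [h, decide_false, pvAltAllowed, ← hlo]
    by_cases hl : lo < ids.length
    · have hne : ¬ ids[lo] = k := fun hc => h (hmem.mp (hc ▸ List.getElem_mem hl))
      simp [hl, hne]
    · simp [hl]

-- B's loop is A's fold: the two membership tests agree pointwise.
theorem pvGo_eq_foldl (allowed_ids : List Int) (fm : List (Int × List String))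
    (d : PySem.Dict Int (List String)) :
    pvAltGo (PySem.List.sorted allowed_ids (fun x => x) false) d fm
      = fm.foldl
          (fun d p => if (PySem.Set.ofList allowed_ids).contains p.1 then d.insert p.1 p.2 else d)
          d := by
  induction fm generalizing d with
  | nil => rfl
  | cons p rest ih =>
    rw [List.foldl_cons, pvAltGo, ih, pvAltAllowed_sorted_eq, pvContains_ofList]

theorem filter_feature_map_eq (feature_map : List (Int × List String)) (allowed_ids : List Int) :
    filter_feature_map feature_map allowed_ids = filter_feature_map_alt feature_map allowed_ids := by
  simp only [filter_feature_map, filter_feature_map_alt, pvGo_eq_foldl]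

-- ===== VERDICT (by name: the statement is the Claim_ definition above) =====
theorem filter_feature_map_spec : Claim_equal_filter_feature_map := by
  intro feature_map allowed_ids _
  exact filter_feature_map_eq feature_map allowed_ids
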